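-- pv_equiv track=rewrite | github.com/viliam-gago/engeto_python_course | homeworks/lesson_8/divisors.py | divisors_pairs_dict
-- ===== SOURCE A (Python) =====
-- def divisors_pairs_dict(start, stop):
--     pairs = dict()
--
--     for divisor in range(2, 10):
--         numbers = range(start, stop + 1)
--
--         for number in numbers:
--             if number % divisor == 0:
--                 pairs[divisor] = pairs.setdefault(divisor, [])
--                 pairs[divisor].append(str(number))
--
--         pairs[divisor] = ', '.join(pairs[divisor])
--
--     return pairs
-- ===== SOURCE B (Python) =====
-- def divisors_pairs_dict(start, stop):
--     # Jump straight to each divisor's first multiple >= start (ceiling division) and step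
--     # through its multiples, instead of scanning every number and testing "% divisor";
--     # then render each group (a missing group raises KeyError, as when no multiple exists).
--     grouped = {}
--     for divisor in range(2, 10):
--         first = -(-start // divisor) * divisor
--         for multiple in range(first, stop + 1, divisor):
--             grouped.setdefault(divisor, []).append(str(multiple))
--     return {divisor: ', '.join(grouped[divisor]) for divisor in range(2, 10)}
-- ===== Notes on version B (the rewrite author's own statement) =====
-- stated objective: faster
-- what changed: Instead of scanning the whole range once per divisor and testing every number with '%', B jumps to each divisor's first multiple >= start by ceiling division and steps directly through its multiples, then renders the groups in a separate dict-comprehension pass.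
import Mathlib
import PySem

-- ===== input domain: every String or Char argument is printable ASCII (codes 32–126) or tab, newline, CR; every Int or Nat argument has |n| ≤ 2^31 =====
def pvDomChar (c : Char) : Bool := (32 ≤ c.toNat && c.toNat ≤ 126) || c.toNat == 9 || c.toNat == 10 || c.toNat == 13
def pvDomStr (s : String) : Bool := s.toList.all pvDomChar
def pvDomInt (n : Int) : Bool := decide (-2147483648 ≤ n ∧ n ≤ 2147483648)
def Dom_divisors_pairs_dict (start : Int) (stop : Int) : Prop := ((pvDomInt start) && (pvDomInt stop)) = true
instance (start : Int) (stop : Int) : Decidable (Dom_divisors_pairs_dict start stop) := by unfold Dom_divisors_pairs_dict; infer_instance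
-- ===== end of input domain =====

-- B replaces A's eight full scans with per-divisor stepped ranges starting at the first
-- multiple >= start (ceiling division); same return value wherever A returns (alternative decomposition).


-- ===== PORT A =====
-- for divisor in range(2,10): scan the whole range, collect str(number) when number % divisor == 0, then join.
def divisors_pairs_dict (start : Int) (stop : Int) : List (Int × String) :=
  (PySem.List.pyRange 2 10 1).foldl (fun pairs divisor =>
    let lst := (PySem.List.pyRange start (stop + 1) 1).foldl
      (fun l number => if PySem.Int.mod number divisor == 0 then l ++ [PySem.Int.toStr number] else l) []
    pairs ++ [(divisor, PySem.Str.join ", " lst)]) []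

-- ===== PORT B =====
-- group: for each divisor, step from its first multiple >= start (ceiling division) through range(first, stop+1, divisor),
-- appending via setdefault (= Dict.modify with default []); render: dict comprehension over range(2,10).
-- grouped[divisor] raises KeyError on a missing key; Pre_ excludes those inputs, so getD _ [] is exact inside Pre_.
def divisors_pairs_dict_alt (start : Int) (stop : Int) : List (Int × String) :=
  let grouped := (PySem.List.pyRange 2 10 1).foldl (fun g divisor =>
    (PySem.List.pyRange (-(PySem.Int.floordiv (-start) divisor) * divisor) (stop + 1) divisor).foldl
      (fun g multiple => g.modify divisor [] (fun v => v ++ [PySem.Int.toStr multiple])) g)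
    PySem.Dict.empty
  (PySem.List.pyRange 2 10 1).map (fun divisor =>
    (divisor, PySem.Str.join ", " (grouped.getD divisor [])))

-- ===== PRECONDITION & SPEC =====
-- Pre_ excludes exactly the inputs where Python A raises KeyError: some divisor d in 2..9 has no
-- multiple in [start, stop] (the largest multiple of d not exceeding stop falls below start);
-- Python B raises KeyError on exactly the same inputs (missing group at render time).
def Pre_divisors_pairs_dict (start : Int) (stop : Int) : Prop :=
  ∀ d ∈ ([2, 3, 4, 5, 6, 7, 8, 9] : List Int), start ≤ d * PySem.Int.floordiv stop d
instance (start : Int) (stop : Int) : Decidable (Pre_divisors_pairs_dict start stop) := by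
  unfold Pre_divisors_pairs_dict; infer_instance
def pvWitness_divisors_pairs_dict : Int × Int := (3, 20)

def Spec_divisors_pairs_dict (start : Int) (stop : Int) (out : List (Int × String)) : Prop := out = divisors_pairs_dict_alt start stop
instance (start : Int) (stop : Int) (out : List (Int × String)) : Decidable (Spec_divisors_pairs_dict start stop out) := by unfold Spec_divisors_pairs_dict; infer_instance

-- ===== CLAIM (what is proved, stated in full; the proofs are below) =====
def Claim_equal_divisors_pairs_dict : Prop := ∀ (start : Int) (stop : Int), Dom_divisors_pairs_dict start stop → Pre_divisors_pairs_dict start stop → Spec_divisors_pairs_dict start stop (divisors_pairs_dict start stop)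

-- ===== LEMMAS AND PROOFS =====

lemma pairwise_pyRange_of_pos (a b d : Int) (hd : 0 < d) :
    (PySem.List.pyRange a b d).Pairwise (· < ·) := by
  rw [PySem.List.pyRange_of_pos a b hd]
  refine List.Pairwise.map _ ?_ List.pairwise_lt_range
  intro i j hij
  have : (i : Int) < (j : Int) := by exact_mod_cast hij
  nlinarith

lemma filter_pyRange (a b d : Int) (hd : 0 < d) :
    (PySem.List.pyRange a b 1).filter (fun n => PySem.Int.mod n d == 0)
      = PySem.List.pyRange (-(PySem.Int.floordiv (-a) d) * d) b d := by
  set q : Int := -(PySem.Int.floordiv (-a) d) with hq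
  have hqb : (q - 1) * d < a ∧ a ≤ q * d :=
    (PySem.Int.neg_floordiv_neg_eq_iff_of_pos hd).mp hq.symm
  have hmem : ∀ x : Int, (x ∈ (PySem.List.pyRange a b 1).filter (fun n => PySem.Int.mod n d == 0))
      ↔ x ∈ PySem.List.pyRange (q * d) b d := by
    intro x
    rw [List.mem_filter, PySem.List.mem_pyRange_iff_of_pos hd]
    simp only [PySem.List.mem_pyRange_one, beq_iff_eq, PySem.Int.mod_eq_zero_iff_dvd]
    constructor
    · rintro ⟨⟨hax, hxb⟩, k, rfl⟩
      refine ⟨?_, hxb, ?_⟩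
      · have : q - 1 < k := by nlinarith [hqb.1]
        nlinarith
      · exact ⟨k - q, by ring⟩
    · rintro ⟨hqx, hxb, m, hm⟩
      refine ⟨⟨by nlinarith [hqb.2], hxb⟩, q + m, by linarith [hm]⟩
  have hnd1 : ((PySem.List.pyRange a b 1).filter (fun n => PySem.Int.mod n d == 0)).Pairwise (· < ·) :=
    List.Pairwise.filter _ (pairwise_pyRange_of_pos a b 1 one_pos)
  have hnd2 := pairwise_pyRange_of_pos (q * d) b d hd
  have hnodup1 : ((PySem.List.pyRange a b 1).filter (fun n => PySem.Int.mod n d == 0)).Nodup :=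
    List.Pairwise.imp ne_of_lt hnd1
  have hnodup2 : (PySem.List.pyRange (q * d) b d).Nodup := List.Pairwise.imp ne_of_lt hnd2
  exact List.Perm.eq_of_pairwise (fun x y _ _ h1 h2 => absurd h2 (not_lt.mpr h1.le)) hnd1 hnd2
    ((List.perm_ext_iff_of_nodup hnodup1 hnodup2).mpr hmem)

lemma getD_inner (lst : List Int) (g : PySem.Dict Int (List String)) (d : Int) :
    (lst.foldl (fun g m => g.modify d [] (fun v => v ++ [PySem.Int.toStr m])) g).getD d []
      = g.getD d [] ++ lst.map PySem.Int.toStr := by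
  induction lst generalizing g with
  | nil => simp
  | cons m rest ih => simp [ih, PySem.Dict.getD_modify_self]

lemma getD_inner_ne (lst : List Int) (g : PySem.Dict Int (List String)) (d d' : Int)
    (h : d' ≠ d) :
    (lst.foldl (fun g m => g.modify d [] (fun v => v ++ [PySem.Int.toStr m])) g).getD d' []
      = g.getD d' [] := by
  induction lst generalizing g with
  | nil => rfl
  | cons m rest ih => simp [ih, PySem.Dict.getD_modify_of_ne _ _ _ h]

lemma getD_inner' (lst : List Int) (g : PySem.Dict Int (List String)) (d d' : Int) :
    (lst.foldl (fun g m => g.modify d [] (fun v => v ++ [PySem.Int.toStr m])) g).getD d' []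
      = if d' = d then g.getD d [] ++ lst.map PySem.Int.toStr else g.getD d' [] := by
  by_cases h : d' = d
  · subst h; simp [getD_inner]
  · simp [h, getD_inner_ne _ _ _ _ h]

lemma inner_eq (a b d : Int) (hd : 0 < d) :
    (PySem.List.pyRange a b 1).foldl
        (fun l number => if PySem.Int.mod number d == 0 then l ++ [PySem.Int.toStr number] else l) []
      = (PySem.List.pyRange (-(PySem.Int.floordiv (-a) d) * d) b d).map PySem.Int.toStr := by
  rw [PySem.List.foldl_append_if (fun n => PySem.Int.mod n d == 0) PySem.Int.toStr, List.nil_append,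
    filter_pyRange a b d hd]

-- ===== VERDICT (by name: the statement is the Claim_ definition above) =====
theorem divisors_pairs_dict_spec : Claim_equal_divisors_pairs_dict := by
  intro start stop _ _
  unfold Spec_divisors_pairs_dict divisors_pairs_dict divisors_pairs_dict_alt
  rw [show PySem.List.pyRange 2 10 1 = [2, 3, 4, 5, 6, 7, 8, 9] from by decide]
  simp only [List.foldl_cons, List.foldl_nil, List.map_cons, List.map_nil,
    inner_eq start (stop + 1) 2 (by norm_num), inner_eq start (stop + 1) 3 (by norm_num),
    inner_eq start (stop + 1) 4 (by norm_num), inner_eq start (stop + 1) 5 (by norm_num),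
    inner_eq start (stop + 1) 6 (by norm_num), inner_eq start (stop + 1) 7 (by norm_num),
    inner_eq start (stop + 1) 8 (by norm_num), inner_eq start (stop + 1) 9 (by norm_num),
    getD_inner', PySem.Dict.getD_empty,
    List.nil_append, List.cons_append]
  norm_num
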